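-- pv_equiv track=rewrite | github.com/bioplanner/bioplanner | src/evaluate_metrics.py | append_index_to_function_names
-- ===== SOURCE A (Python) =====
-- def append_index_to_function_names(func_dict):
--     func_count = {}
--     new_func_dict = {}
--
--     for func_name, args in func_dict.items():
--         if func_name not in func_count:
--             func_count[func_name] = 0
--         else:
--             func_count[func_name] += 1
--
--         new_func_name = func_name + str(func_count[func_name])
--         new_func_dict[new_func_name] = args
--
--     return new_func_dict
-- ===== SOURCE B (Python) =====
-- def append_index_to_function_names(func_dict):
--     # dict keys are unique, so A's occurrence counter is always 0:
--     # every key simply gets the suffix "0".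
--     return {name + "0": args for name, args in func_dict.items()}
-- ===== Notes on version B (the rewrite author's own statement) =====
-- stated objective: simpler
-- what changed: Since dict keys are unique the occurrence counter in A is always 0, so B drops the auxiliary count dict and the branch entirely and builds the result in one dict comprehension appending '0' to every key; Pre_ states the dict representation invariant (no duplicate keys in the association list), which every real Python dict satisfies.
import Mathlib
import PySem

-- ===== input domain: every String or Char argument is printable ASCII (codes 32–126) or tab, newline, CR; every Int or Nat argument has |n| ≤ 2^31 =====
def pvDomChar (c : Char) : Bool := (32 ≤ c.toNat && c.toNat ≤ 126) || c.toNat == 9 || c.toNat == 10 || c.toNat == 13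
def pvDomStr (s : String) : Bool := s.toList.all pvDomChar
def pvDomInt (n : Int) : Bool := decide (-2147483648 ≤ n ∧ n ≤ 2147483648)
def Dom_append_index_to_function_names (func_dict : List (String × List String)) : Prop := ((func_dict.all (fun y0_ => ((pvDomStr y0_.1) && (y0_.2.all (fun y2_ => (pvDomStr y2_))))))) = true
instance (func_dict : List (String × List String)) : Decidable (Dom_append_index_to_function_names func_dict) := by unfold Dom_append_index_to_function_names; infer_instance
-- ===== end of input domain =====

-- B replaces A's counter-dict-and-branch loop with a single direct mapping (simpler); return-value equivalence on assoc lists with unique keys (the Python-dict invariant).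

-- ===== PORT A =====
-- one iteration of A's loop: state = (func_count, new_func_dict)
def pvStepA (st : PySem.Dict String Int × PySem.Dict String (List String))
    (p : String × List String) :
    PySem.Dict String Int × PySem.Dict String (List String) :=
  let fc := if st.1.contains p.1 = false then st.1.insert p.1 0
            else st.1.modify p.1 0 (· + 1)
  let newName := p.1 ++ PySem.Int.toStr (fc.getD p.1 0)
  (fc, st.2.insert newName p.2)

def append_index_to_function_names (func_dict : List (String × List String)) : List (String × List String) :=
  ((func_dict.foldl pvStepA (PySem.Dict.empty, PySem.Dict.empty)).2).items

-- ===== PORT B =====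
-- the dict comprehension {name + "0": args for name, args in func_dict.items()}
def append_index_to_function_names_alt (func_dict : List (String × List String)) : List (String × List String) :=
  (func_dict.foldl (fun d p => d.insert (p.1 ++ "0") p.2)
      (PySem.Dict.empty : PySem.Dict String (List String))).items

-- ===== PRECONDITION & SPEC =====
-- Pre_ excludes association lists with duplicate keys: these never arise from a Python dict
-- (the input IS a dict), they only exist in the assoc-list representation.
def Pre_append_index_to_function_names (func_dict : List (String × List String)) : Prop :=
  (func_dict.map Prod.fst).Nodup
instance (func_dict : List (String × List String)) : Decidable (Pre_append_index_to_function_names func_dict) := by unfold Pre_append_index_to_function_names; infer_instance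

def pvWitness_append_index_to_function_names : (List (String × List String)) :=
  [("f", ["x"]), ("g", [])]

def Spec_append_index_to_function_names (func_dict : List (String × List String)) (out : List (String × List String)) : Prop := out = append_index_to_function_names_alt func_dict
instance (func_dict : List (String × List String)) (out : List (String × List String)) : Decidable (Spec_append_index_to_function_names func_dict out) := by unfold Spec_append_index_to_function_names; infer_instance

-- ===== CLAIM (what is proved, stated in full; the proofs are below) =====
def Claim_equal_append_index_to_function_names : Prop := ∀ (func_dict : List (String × List String)), Dom_append_index_to_function_names func_dict → Pre_append_index_to_function_names func_dict → Spec_append_index_to_function_names func_dict (append_index_to_function_names func_dict)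

-- ===== LEMMAS AND PROOFS =====

-- under unique (and fresh-to-the-counter) keys, A's loop state's dict component is B's loop
theorem pvLoop_eq (l : List (String × List String))
    (fc : PySem.Dict String Int) (nd : PySem.Dict String (List String))
    (h1 : ∀ p ∈ l, fc.contains p.1 = false)
    (h2 : (l.map Prod.fst).Nodup) :
    (l.foldl pvStepA (fc, nd)).2 =
      l.foldl (fun d p => d.insert (p.1 ++ "0") p.2) nd := by
  induction l generalizing fc nd with
  | nil => rfl
  | cons p t ih =>
    simp only [List.foldl_cons]
    have hp : fc.contains p.1 = false := h1 p (List.mem_cons_self ..)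
    have hstep : pvStepA (fc, nd) p =
        (fc.insert p.1 0, nd.insert (p.1 ++ "0") p.2) := by
      simp [pvStepA, hp, PySem.Dict.getD_insert_self]
      rfl
    rw [hstep]
    simp only [List.map_cons, List.nodup_cons] at h2
    apply ih
    · intro q hq
      rw [PySem.Dict.contains_insert]
      have hne : q.1 ≠ p.1 := by
        intro he; exact h2.1 (he ▸ List.mem_map_of_mem hq)
      simp [hne, h1 q (List.mem_cons_of_mem _ hq)]
    · exact h2.2

-- ===== VERDICT (by name: the statement is the Claim_ definition above) =====
theorem append_index_to_function_names_spec : Claim_equal_append_index_to_function_names := by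
  intro l _ hpre
  unfold Spec_append_index_to_function_names
  unfold append_index_to_function_names append_index_to_function_names_alt
  rw [pvLoop_eq l PySem.Dict.empty PySem.Dict.empty
      (fun p _ => PySem.Dict.contains_empty _) hpre]
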